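-- pv_equiv track=rewrite | github.com/pypi-data/pypi-mirror-8 | packages/okcupyd/okcupyd-0.8.1.tar.gz/okcupyd-0.8.1/okcupyd/magicnumbers.py | get_kids_query
-- ===== SOURCE A (Python) =====
-- has_kids = {
--     "has a kid": {"addition": 33686018, "power": 1},
--     "has kids": {"addition": 67372036, "power": 2},
--     "doesn't have kids": {"addition": 1077952576, "power": 6},
-- }
--
-- wants_kids = {
--     "might want kids": {"addition": 18176, "power": 8},
--     "wants kids": {"addition": 4653056, "power": 16},
--     "doesn't want kids": {"addition": 1191182384, "power": 24},
-- }
--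
-- def get_kids_query(kids):
--     kids = [kid.lower() for kid in kids]
--     kid_int = 0
--     include_has = False
--     include_wants = False
--     for option in kids:
--         if option in has_kids:
--             include_has = True
--         elif option in wants_kids:
--             include_wants = True
--     if include_has and not include_wants:
--         for option in kids:
--             if option in has_kids:
--                 kid_int += has_kids[option]['addition']
--     elif include_wants and not include_has:
--         for option in kids:
--             if option in wants_kids:
--                 kid_int += wants_kids[option]['addition']
--     elif include_wants and include_has:
--         for has_option in kids:
--             if has_option in has_kids:
--                 for wants_option in kids:
--                     if wants_option in wants_kids:
--                         kid_int += 2**(has_kids[has_option]['power'] + wants_kids[wants_option]['power'])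
--     return '18,{0}'.format(kid_int)
-- ===== SOURCE B (Python) =====
-- has_kids = {
--     "has a kid": {"addition": 33686018, "power": 1},
--     "has kids": {"addition": 67372036, "power": 2},
--     "doesn't have kids": {"addition": 1077952576, "power": 6},
-- }
--
-- wants_kids = {
--     "might want kids": {"addition": 18176, "power": 8},
--     "wants kids": {"addition": 4653056, "power": 16},
--     "doesn't want kids": {"addition": 1191182384, "power": 24},
-- }
--
-- def get_kids_query(kids):
--     # One pass: accumulate the 'addition' sums and the power-of-two sums for
--     # both categories; the mixed case factors sum(2**(a+b)) = (sum 2**a) * (sum 2**b).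
--     has_add = wants_add = has_pow = wants_pow = 0
--     for kid in kids:
--         k = kid.lower()
--         if k in has_kids:
--             e = has_kids[k]
--             has_add += e['addition']
--             has_pow += 2 ** e['power']
--         elif k in wants_kids:
--             e = wants_kids[k]
--             wants_add += e['addition']
--             wants_pow += 2 ** e['power']
--     if has_pow and wants_pow:
--         kid_int = has_pow * wants_pow
--     elif has_pow:
--         kid_int = has_add
--     elif wants_pow:
--         kid_int = wants_add
--     else:
--         kid_int = 0
--     return '18,{0}'.format(kid_int)
-- ===== Notes on version B (the rewrite author's own statement) =====
-- stated objective: alternative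
-- what changed: Single pass accumulating both categories' addition sums and power-of-two sums, with the mixed case computed by factoring the nested sum of 2^(a+b) into the product (sum 2^a)*(sum 2^b), replacing A's flag pre-pass plus per-branch re-scans and nested double loop.
import Mathlib
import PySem

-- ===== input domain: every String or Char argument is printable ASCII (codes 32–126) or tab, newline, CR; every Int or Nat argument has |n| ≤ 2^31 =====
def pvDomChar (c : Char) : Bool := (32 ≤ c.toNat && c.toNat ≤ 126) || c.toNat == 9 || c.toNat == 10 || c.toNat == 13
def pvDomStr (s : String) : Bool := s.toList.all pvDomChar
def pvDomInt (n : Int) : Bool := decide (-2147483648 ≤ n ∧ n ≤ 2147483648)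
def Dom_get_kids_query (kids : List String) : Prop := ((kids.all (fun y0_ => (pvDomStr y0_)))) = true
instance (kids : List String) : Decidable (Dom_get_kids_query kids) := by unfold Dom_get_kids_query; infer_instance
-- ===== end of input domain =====

-- B replaces A's flag pre-pass, per-branch re-scans and nested double loop by a single pass
-- accumulating four sums, computing the mixed case as the product (sum 2^a)*(sum 2^b)
-- instead of the nested sum of 2^(a+b) (objective: alternative algorithm).

-- module constants (Python dicts of dicts)
def has_kids : PySem.Dict String (PySem.Dict String Int) :=
  PySem.Dict.mk [("has a kid", PySem.Dict.mk [("addition", 33686018), ("power", 1)]),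
                 ("has kids", PySem.Dict.mk [("addition", 67372036), ("power", 2)]),
                 ("doesn't have kids", PySem.Dict.mk [("addition", 1077952576), ("power", 6)])]

def wants_kids : PySem.Dict String (PySem.Dict String Int) :=
  PySem.Dict.mk [("might want kids", PySem.Dict.mk [("addition", 18176), ("power", 8)]),
                 ("wants kids", PySem.Dict.mk [("addition", 4653056), ("power", 16)]),
                 ("doesn't want kids", PySem.Dict.mk [("addition", 1191182384), ("power", 24)])]

-- shared lookup helpers ('option in has_kids', has_kids[option]['addition'], …['power']);
-- the getD defaults are only reached when the key is absent, which neither program does.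
def memHas (s : String) : Bool := PySem.Dict.contains has_kids s
def memWants (s : String) : Bool := PySem.Dict.contains wants_kids s
def hasAddition (s : String) : Int := PySem.Dict.getD (PySem.Dict.getD has_kids s PySem.Dict.empty) "addition" 0
def hasPower (s : String) : Int := PySem.Dict.getD (PySem.Dict.getD has_kids s PySem.Dict.empty) "power" 0
def wantsAddition (s : String) : Int := PySem.Dict.getD (PySem.Dict.getD wants_kids s PySem.Dict.empty) "addition" 0
def wantsPower (s : String) : Int := PySem.Dict.getD (PySem.Dict.getD wants_kids s PySem.Dict.empty) "power" 0

-- ===== PORT A =====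
-- literal transliteration: flag pre-pass, then one of three branch loops (nested loop in the mixed case).
-- 2**e with e = sum of the two (nonnegative) 'power' entries is ported as 2 ^ e.toNat (exact for e ≥ 0).
def get_kids_query (kids : List String) : String :=
  let kids := kids.map PySem.Str.lower
  let fl := kids.foldl (fun (fl : Bool × Bool) option =>
      if memHas option then (true, fl.2)
      else if memWants option then (fl.1, true)
      else fl) (false, false)
  let kid_int : Int :=
    if fl.1 && !fl.2 then
      kids.foldl (fun acc option => if memHas option then acc + hasAddition option else acc) 0
    else if fl.2 && !fl.1 then
      kids.foldl (fun acc option => if memWants option then acc + wantsAddition option else acc) 0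
    else if fl.2 && fl.1 then
      kids.foldl (fun acc has_option =>
        if memHas has_option then
          kids.foldl (fun acc2 wants_option =>
            if memWants wants_option then
              acc2 + 2 ^ (hasPower has_option + wantsPower wants_option).toNat
            else acc2) acc
        else acc) 0
    else 0
  "18," ++ PySem.Int.toStr kid_int

-- ===== PORT B =====
-- single pass accumulating (has_add, wants_add, has_pow, wants_pow); mixed case = has_pow * wants_pow.
def get_kids_query_alt (kids : List String) : String :=
  let st := kids.foldl (fun (st : Int × Int × Int × Int) kid =>
      let k := PySem.Str.lower kid
      if memHas k then (st.1 + hasAddition k, st.2.1, st.2.2.1 + 2 ^ (hasPower k).toNat, st.2.2.2)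
      else if memWants k then (st.1, st.2.1 + wantsAddition k, st.2.2.1, st.2.2.2 + 2 ^ (wantsPower k).toNat)
      else st) (0, 0, 0, 0)
  let kid_int : Int :=
    if st.2.2.1 != 0 && st.2.2.2 != 0 then st.2.2.1 * st.2.2.2
    else if st.2.2.1 != 0 then st.1
    else if st.2.2.2 != 0 then st.2.1
    else 0
  "18," ++ PySem.Int.toStr kid_int

-- ===== PRECONDITION & SPEC =====
def Spec_get_kids_query (kids : List String) (out : String) : Prop := out = get_kids_query_alt kids
instance (kids : List String) (out : String) : Decidable (Spec_get_kids_query kids out) := by unfold Spec_get_kids_query; infer_instance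

-- ===== CLAIM (what is proved, stated in full; the proofs are below) =====
def Claim_equal_get_kids_query : Prop := ∀ (kids : List String), Dom_get_kids_query kids → Spec_get_kids_query kids (get_kids_query kids)

-- ===== LEMMAS AND PROOFS =====

-- per-element contributions (0 for a non-member)
def hA (s : String) : Int := if memHas s then hasAddition s else 0
def wA (s : String) : Int := if memWants s then wantsAddition s else 0
def hP (s : String) : Int := if memHas s then 2 ^ (hasPower s).toNat else 0
def wP (s : String) : Int := if memWants s then 2 ^ (wantsPower s).toNat else 0

-- the two key sets are disjoint
theorem memHas_not_memWants (s : String) (h : memHas s = true) : memWants s = false := by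
  revert h
  unfold memHas memWants has_kids wants_kids
  simp [PySem.Dict.contains_mk]
  rintro (rfl | rfl | rfl) <;> decide

theorem hP_nonneg (s : String) : 0 ≤ hP s := by
  unfold hP; split_ifs <;> positivity

theorem wP_nonneg (s : String) : 0 ≤ wP s := by
  unfold wP; split_ifs <;> positivity

theorem hasPower_nonneg (s : String) : 0 ≤ hasPower s := by
  unfold hasPower has_kids
  simp [PySem.Dict.getD, PySem.Dict.get?_mk_cons]
  split_ifs <;> simp [PySem.Dict.get?, PySem.Dict.empty]

theorem wantsPower_nonneg (s : String) : 0 ≤ wantsPower s := by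
  unfold wantsPower wants_kids
  simp [PySem.Dict.getD, PySem.Dict.get?_mk_cons]
  split_ifs <;> simp [PySem.Dict.get?, PySem.Dict.empty]

def sumOf (f : String → Int) (l : List String) : Int := (l.map f).sum

theorem sumOf_cons (f : String → Int) (x : String) (l : List String) :
    sumOf f (x :: l) = f x + sumOf f l := by simp [sumOf]

theorem sumOf_hP_nonneg (l : List String) : 0 ≤ sumOf hP l := by
  induction l with
  | nil => simp [sumOf]
  | cons x l ih => rw [sumOf_cons]; have := hP_nonneg x; omega

theorem sumOf_wP_nonneg (l : List String) : 0 ≤ sumOf wP l := by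
  induction l with
  | nil => simp [sumOf]
  | cons x l ih => rw [sumOf_cons]; have := wP_nonneg x; omega

-- the flag pre-pass computes (any memHas, any memWants)
theorem flags_eq (l : List String) (a b : Bool) :
    l.foldl (fun (fl : Bool × Bool) option =>
      if memHas option then (true, fl.2)
      else if memWants option then (fl.1, true)
      else fl) (a, b) = (a || l.any memHas, b || l.any memWants) := by
  induction l generalizing a b with
  | nil => simp
  | cons x l ih =>
    simp only [List.foldl_cons, List.any_cons]
    by_cases hH : memHas x
    · simp [hH, memHas_not_memWants x hH, ih]
    · by_cases hW : memWants x <;> simp [hH, hW, ih]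

theorem hasSum_eq (l : List String) (acc : Int) :
    l.foldl (fun acc option => if memHas option then acc + hasAddition option else acc) acc
      = acc + sumOf hA l := by
  induction l generalizing acc with
  | nil => simp [sumOf]
  | cons x l ih =>
    simp only [List.foldl_cons, sumOf_cons, hA]
    split_ifs with h
    · rw [ih]; ring
    · rw [ih]; ring

theorem wantsSum_eq (l : List String) (acc : Int) :
    l.foldl (fun acc option => if memWants option then acc + wantsAddition option else acc) acc
      = acc + sumOf wA l := by
  induction l generalizing acc with
  | nil => simp [sumOf]
  | cons x l ih =>
    simp only [List.foldl_cons, sumOf_cons, wA]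
    split_ifs with h
    · rw [ih]; ring
    · rw [ih]; ring

-- inner loop of the mixed case: sums 2^(p_h + p_w) over the wants-members of l
theorem innerSum_eq (h : String) (l : List String) (acc : Int) :
    l.foldl (fun acc2 wants_option =>
      if memWants wants_option then
        acc2 + 2 ^ (hasPower h + wantsPower wants_option).toNat
      else acc2) acc
      = acc + 2 ^ (hasPower h).toNat * sumOf wP l := by
  induction l generalizing acc with
  | nil => simp [sumOf]
  | cons x l ih =>
    simp only [List.foldl_cons, sumOf_cons, wP]
    split_ifs with hx
    · rw [ih, Int.toNat_add (hasPower_nonneg h) (wantsPower_nonneg x), pow_add]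
      ring
    · rw [ih]; ring

-- outer loop of the mixed case: the nested sum factors into a product
theorem nestedSum_eq (l full : List String) (acc : Int) :
    l.foldl (fun acc has_option =>
      if memHas has_option then
        full.foldl (fun acc2 wants_option =>
          if memWants wants_option then
            acc2 + 2 ^ (hasPower has_option + wantsPower wants_option).toNat
          else acc2) acc
      else acc) acc
      = acc + sumOf hP l * sumOf wP full := by
  induction l generalizing acc with
  | nil => simp [sumOf]
  | cons x l ih =>
    simp only [List.foldl_cons, sumOf_cons, hP]
    split_ifs with hx
    · rw [innerSum_eq, ih]; ring
    · rw [ih]; ring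

-- B's single pass computes the four sums over the lowered list
theorem bfold_eq (l : List String) (a b c d : Int) :
    l.foldl (fun (st : Int × Int × Int × Int) kid =>
      let k := PySem.Str.lower kid
      if memHas k then (st.1 + hasAddition k, st.2.1, st.2.2.1 + 2 ^ (hasPower k).toNat, st.2.2.2)
      else if memWants k then (st.1, st.2.1 + wantsAddition k, st.2.2.1, st.2.2.2 + 2 ^ (wantsPower k).toNat)
      else st) (a, b, c, d)
      = (a + sumOf hA (l.map PySem.Str.lower), b + sumOf wA (l.map PySem.Str.lower),
         c + sumOf hP (l.map PySem.Str.lower), d + sumOf wP (l.map PySem.Str.lower)) := by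
  induction l generalizing a b c d with
  | nil => simp [sumOf]
  | cons x l ih =>
    simp only [List.foldl_cons, List.map_cons, sumOf_cons, hA, wA, hP, wP]
    by_cases hH : memHas (PySem.Str.lower x)
    · simp [hH, memHas_not_memWants _ hH, ih]
      refine ⟨by ring, by ring⟩
    · by_cases hW : memWants (PySem.Str.lower x)
      · simp [hH, hW, ih]
        refine ⟨by ring, by ring⟩
      · simp [hH, hW, ih]

-- positivity: a category's power sum is nonzero exactly when some member occurs
theorem any_memHas_iff (l : List String) : l.any memHas = true ↔ 0 < sumOf hP l := by
  induction l with
  | nil => simp [sumOf]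
  | cons x l ih =>
    rw [List.any_cons, sumOf_cons]
    by_cases hx : memHas x
    · have h1 : (0 : Int) < hP x := by
        unfold hP; rw [if_pos hx]; positivity
      have := sumOf_hP_nonneg l
      simp [hx]; omega
    · have h1 : hP x = 0 := by unfold hP; rw [if_neg hx]
      simp [hx, h1, ih]

theorem any_memWants_iff (l : List String) : l.any memWants = true ↔ 0 < sumOf wP l := by
  induction l with
  | nil => simp [sumOf]
  | cons x l ih =>
    rw [List.any_cons, sumOf_cons]
    by_cases hx : memWants x
    · have h1 : (0 : Int) < wP x := by
        unfold wP; rw [if_pos hx]; positivity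
      have := sumOf_wP_nonneg l
      simp [hx]; omega
    · have h1 : wP x = 0 := by unfold wP; rw [if_neg hx]
      simp [hx, h1, ih]

-- ===== VERDICT (by name: the statement is the Claim_ definition above) =====
theorem get_kids_query_spec : Claim_equal_get_kids_query := by
  intro kids _
  unfold Spec_get_kids_query
  simp only [get_kids_query, get_kids_query_alt]
  rw [flags_eq, bfold_eq]
  set L := kids.map PySem.Str.lower with hL
  simp only [Bool.false_or, zero_add]
  have hH := any_memHas_iff L
  have hW := any_memWants_iff L
  have hHn := sumOf_hP_nonneg L
  have hWn := sumOf_wP_nonneg L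
  by_cases h1 : L.any memHas <;> by_cases h2 : L.any memWants
  · -- both categories present: the nested sum factors into the product
    have p1 : 0 < sumOf hP L := hH.mp h1
    have p2 : 0 < sumOf wP L := hW.mp h2
    rw [nestedSum_eq]
    simp [h1, h2, show sumOf hP L ≠ 0 by omega, show sumOf wP L ≠ 0 by omega]
  · -- has only
    have p2 : sumOf wP L = 0 := by
      by_contra hc
      exact h2 (hW.mpr (by omega))
    rw [hasSum_eq]
    simp [h1, h2, p2, show sumOf hP L ≠ 0 by have := hH.mp h1; omega]
  · -- wants only
    have p1 : sumOf hP L = 0 := by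
      by_contra hc
      exact h1 (hH.mpr (by omega))
    rw [wantsSum_eq]
    simp [h1, h2, p1, show sumOf wP L ≠ 0 by have := hW.mp h2; omega]
  · -- neither
    have p1 : sumOf hP L = 0 := by
      by_contra hc
      exact h1 (hH.mpr (by omega))
    have p2 : sumOf wP L = 0 := by
      by_contra hc
      exact h2 (hW.mpr (by omega))
    simp [h1, h2, p1, p2]
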